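-- pv_equiv track=rewrite | github.com/nitesh16s/DS-Algo-Problems | CodeChef/Feb Challenge/max_fun.py | maxfun
-- ===== SOURCE A (Python) =====
-- def maxfun(arr, N):
--     maxm = 0
--     for i in range(N):
--         for j in range(i+1, N):
--             for k in range(j+1, N):
--                 summ = abs(arr[i] - arr[j]) + \
--                     abs(arr[j] - arr[k]) + abs(arr[k] - arr[i])
--                 maxm = max(maxm, summ)
--     return maxm
-- ===== SOURCE B (Python) =====
-- def maxfun(arr, N):
--     if N < 3:
--         return 0
--     s = arr[:N]
--     return 2 * (max(s) - min(s))
-- ===== Notes on version B (the rewrite author's own statement) =====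
-- stated objective: faster
-- what changed: Replaces the O(N^3) brute-force scan over all index triples by the closed form 2*(max-min) of the first N elements (the triple sum |a-b|+|b-c|+|c-a| equals twice the spread), with 0 for N<3.
import Mathlib
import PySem

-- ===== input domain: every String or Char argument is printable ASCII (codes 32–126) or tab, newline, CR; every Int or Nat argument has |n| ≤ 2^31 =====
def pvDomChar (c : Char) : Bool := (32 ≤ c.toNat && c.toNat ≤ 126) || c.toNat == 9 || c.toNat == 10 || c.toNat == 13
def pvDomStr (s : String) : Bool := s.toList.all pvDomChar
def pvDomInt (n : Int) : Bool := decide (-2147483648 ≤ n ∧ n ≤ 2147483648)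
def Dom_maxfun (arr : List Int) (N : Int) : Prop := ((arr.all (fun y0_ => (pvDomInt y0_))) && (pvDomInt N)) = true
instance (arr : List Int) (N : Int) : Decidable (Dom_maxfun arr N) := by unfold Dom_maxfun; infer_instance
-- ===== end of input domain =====

-- B replaces A's O(N^3) scan over all index triples by the closed form 2*(max-min)
-- of the first N elements (0 for N < 3); objective: faster (asymptotic).

-- ===== PORT A =====
def maxfun (arr : List Int) (N : Int) : Int :=
  (PySem.List.pyRange 0 N 1).foldl (fun maxm i =>
    (PySem.List.pyRange (i + 1) N 1).foldl (fun maxm j =>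
      (PySem.List.pyRange (j + 1) N 1).foldl (fun maxm k =>
        max maxm (|PySem.List.pyGetD arr i 0 - PySem.List.pyGetD arr j 0| +
          |PySem.List.pyGetD arr j 0 - PySem.List.pyGetD arr k 0| +
          |PySem.List.pyGetD arr k 0 - PySem.List.pyGetD arr i 0|)) maxm) maxm) 0

-- ===== PORT B =====
def maxfun_alt (arr : List Int) (N : Int) : Int :=
  if N < 3 then 0
  else
    let s := PySem.List.slice arr none (some N)
    2 * ((PySem.List.max? s (fun x => x)).getD 0 - (PySem.List.min? s (fun x => x)).getD 0)

-- ===== PRECONDITION & SPEC =====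
-- A raises IndexError when 3 ≤ N but arr has fewer than N elements; those inputs are excluded.
def Pre_maxfun (arr : List Int) (N : Int) : Prop := 3 ≤ N → N ≤ (arr.length : Int)
instance (arr : List Int) (N : Int) : Decidable (Pre_maxfun arr N) := by unfold Pre_maxfun; infer_instance
def pvWitness_maxfun : List Int × Int := ([1, 5, 2], 3)

def Spec_maxfun (arr : List Int) (N : Int) (out : Int) : Prop := out = maxfun_alt arr N
instance (arr : List Int) (N : Int) (out : Int) : Decidable (Spec_maxfun arr N out) := by unfold Spec_maxfun; infer_instance

-- ===== CLAIM (what is proved, stated in full; the proofs are below) =====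
def Claim_equal_maxfun : Prop := ∀ (arr : List Int) (N : Int), Dom_maxfun arr N → Pre_maxfun arr N → Spec_maxfun arr N (maxfun arr N)

-- ===== LEMMAS AND PROOFS =====

-- the summand A computes for one index triple (proof-side abbreviation, definitionally A's body)
def pvTerm (arr : List Int) (i j k : Int) : Int :=
  |PySem.List.pyGetD arr i 0 - PySem.List.pyGetD arr j 0| +
    |PySem.List.pyGetD arr j 0 - PySem.List.pyGetD arr k 0| +
    |PySem.List.pyGetD arr k 0 - PySem.List.pyGetD arr i 0|

lemma pvFoldInfl (f : Int → Int → Int) (hf : ∀ m x, m ≤ f m x) (l : List Int) (m : Int) :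
    m ≤ l.foldl f m := by
  induction l generalizing m with
  | nil => exact le_rfl
  | cons a l ih => exact le_trans (hf m a) (ih (f m a))

lemma pvFoldLe (f : Int → Int → Int) (l : List Int) (c : Int)
    (hf : ∀ m x, x ∈ l → m ≤ c → f m x ≤ c) :
    ∀ m, m ≤ c → l.foldl f m ≤ c := by
  induction l with
  | nil => intro m hm; exact hm
  | cons a l ih =>
    intro m hm
    exact ih (fun m' x hx => hf m' x (List.mem_cons_of_mem a hx)) _
      (hf m a (List.mem_cons_self ..) hm)

lemma pvFoldGe (f : Int → Int → Int) (hf : ∀ m x, m ≤ f m x) (l : List Int) (x : Int)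
    (hx : x ∈ l) (t : Int) (ht : ∀ m, t ≤ f m x) : ∀ m, t ≤ l.foldl f m := by
  induction l with
  | nil => cases hx
  | cons a l ih =>
    intro m
    rcases List.mem_cons.mp hx with rfl | hx'
    · exact le_trans (ht m) (pvFoldInfl f hf l (f m x))
    · exact ih hx' (f m a)

lemma pvInner2_infl (arr : List Int) (N i m : Int) :
    m ≤ (PySem.List.pyRange (i + 1) N 1).foldl (fun maxm j =>
      (PySem.List.pyRange (j + 1) N 1).foldl (fun maxm k =>
        max maxm (pvTerm arr i j k)) maxm) m :=
  pvFoldInfl _ (fun m' _ => pvFoldInfl _ (fun m'' _ => le_max_left m'' _) _ m') _ m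

lemma pvMaxfun_eq (arr : List Int) (N : Int) :
    maxfun arr N = (PySem.List.pyRange 0 N 1).foldl (fun maxm i =>
      (PySem.List.pyRange (i + 1) N 1).foldl (fun maxm j =>
        (PySem.List.pyRange (j + 1) N 1).foldl (fun maxm k =>
          max maxm (pvTerm arr i j k)) maxm) maxm) 0 := rfl

lemma pvMaxfun_nonneg (arr : List Int) (N : Int) : 0 ≤ maxfun arr N := by
  rw [pvMaxfun_eq]
  exact pvFoldInfl _ (fun m i => pvInner2_infl arr N i m) _ 0

lemma pvTerm_le_maxfun (arr : List Int) (N i j k : Int) (hi : 0 ≤ i) (hij : i < j)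
    (hjk : j < k) (hk : k < N) : pvTerm arr i j k ≤ maxfun arr N := by
  rw [pvMaxfun_eq]
  have hmi : i ∈ PySem.List.pyRange 0 N 1 := (PySem.List.mem_pyRange_one).mpr ⟨hi, by omega⟩
  have hmj : j ∈ PySem.List.pyRange (i + 1) N 1 := (PySem.List.mem_pyRange_one).mpr ⟨by omega, by omega⟩
  have hmk : k ∈ PySem.List.pyRange (j + 1) N 1 := (PySem.List.mem_pyRange_one).mpr ⟨by omega, hk⟩
  refine pvFoldGe _ (fun m i' => pvInner2_infl arr N i' m) _ i hmi _ (fun m => ?_) 0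
  refine pvFoldGe _ (fun m' j' => pvFoldInfl _ (fun m'' _ => le_max_left m'' _) _ m') _ j
    hmj _ (fun m' => ?_) m
  exact pvFoldGe (fun m'' x => max m'' (pvTerm arr i j x)) (fun m'' x => le_max_left m'' _) _ k
    hmk (pvTerm arr i j k) (fun m'' => le_max_right m'' _) m'

lemma pvMaxfun_le (arr : List Int) (N c : Int) (h0 : 0 ≤ c)
    (hterm : ∀ i j k : Int, 0 ≤ i → i < j → j < k → k < N → pvTerm arr i j k ≤ c) :
    maxfun arr N ≤ c := by
  rw [pvMaxfun_eq]
  refine pvFoldLe _ _ c (fun m i hi hm => ?_) 0 h0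
  obtain ⟨hi0, hiN⟩ := (PySem.List.mem_pyRange_one).mp hi
  refine pvFoldLe _ _ c (fun m' j hj hm' => ?_) m hm
  obtain ⟨hj0, hjN⟩ := (PySem.List.mem_pyRange_one).mp hj
  refine pvFoldLe _ _ c (fun m'' k hkm hm'' => ?_) m' hm'
  obtain ⟨hk0, hkN⟩ := (PySem.List.mem_pyRange_one).mp hkm
  exact max_le hm'' (hterm i j k hi0 (by omega) (by omega) hkN)

lemma pvTri_ge (a b c m M : Int)
    (hper : (a = M ∧ b = m) ∨ (a = M ∧ c = m) ∨ (b = M ∧ a = m) ∨ (b = M ∧ c = m) ∨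
      (c = M ∧ a = m) ∨ (c = M ∧ b = m))
    (hb : m ≤ a ∧ a ≤ M ∧ m ≤ b ∧ b ≤ M ∧ m ≤ c ∧ c ≤ M) :
    2 * (M - m) ≤ |a - b| + |b - c| + |c - a| := by
  obtain ⟨h1, _⟩ | ⟨h1, _⟩ := abs_cases (a - b) <;>
    obtain ⟨h2, _⟩ | ⟨h2, _⟩ := abs_cases (b - c) <;>
      obtain ⟨h3, _⟩ | ⟨h3, _⟩ := abs_cases (c - a) <;>
        rw [h1, h2, h3] <;> omega

lemma pvTri_le (a b c m M : Int)
    (hb : m ≤ a ∧ a ≤ M ∧ m ≤ b ∧ b ≤ M ∧ m ≤ c ∧ c ≤ M) :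
    |a - b| + |b - c| + |c - a| ≤ 2 * (M - m) := by
  obtain ⟨h1, _⟩ | ⟨h1, _⟩ := abs_cases (a - b) <;>
    obtain ⟨h2, _⟩ | ⟨h2, _⟩ := abs_cases (b - c) <;>
      obtain ⟨h3, _⟩ | ⟨h3, _⟩ := abs_cases (c - a) <;>
        rw [h1, h2, h3] <;> omega

-- sorted triple of three distinct indices carrying M and m lower-bounds A's result
lemma pvPair_le (arr : List Int) (N : Int) (x y z : Nat) (hxy : x < y) (hyz : y < z)
    (hz : (z : Int) < N) (m M : Int)
    (hper : ((arr.getD x 0 = M ∧ arr.getD y 0 = m) ∨ (arr.getD x 0 = M ∧ arr.getD z 0 = m) ∨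
      (arr.getD y 0 = M ∧ arr.getD x 0 = m) ∨ (arr.getD y 0 = M ∧ arr.getD z 0 = m) ∨
      (arr.getD z 0 = M ∧ arr.getD x 0 = m) ∨ (arr.getD z 0 = M ∧ arr.getD y 0 = m)))
    (hb : m ≤ arr.getD x 0 ∧ arr.getD x 0 ≤ M ∧ m ≤ arr.getD y 0 ∧ arr.getD y 0 ≤ M ∧
      m ≤ arr.getD z 0 ∧ arr.getD z 0 ≤ M) :
    2 * (M - m) ≤ maxfun arr N := by
  refine le_trans ?_ (pvTerm_le_maxfun arr N x y z (by positivity) (by exact_mod_cast hxy)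
    (by exact_mod_cast hyz) hz)
  unfold pvTerm
  simp only [PySem.List.pyGetD_natCast]
  exact pvTri_ge _ _ _ m M hper hb

-- ===== VERDICT (by name: the statement is the Claim_ definition above) =====
theorem maxfun_spec : Claim_equal_maxfun := by
  intro arr N _ hpre
  unfold Spec_maxfun maxfun_alt
  by_cases hN : N < 3
  · simp only [if_pos hN]
    refine le_antisymm ?_ (pvMaxfun_nonneg arr N)
    exact pvMaxfun_le arr N 0 le_rfl (fun i j k hi hij hjk hk => absurd hk (by omega))
  · simp only [if_neg hN]
    have hN3 : 3 ≤ N := by omega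
    have hlen : N ≤ (arr.length : Int) := hpre hN3
    have hsval : PySem.List.slice arr none (some N) = arr.take N.toNat :=
      PySem.List.slice_to arr (by omega)
    set s := PySem.List.slice arr none (some N) with hs
    have hslen : s.length = N.toNat := by
      rw [hsval]; simp only [List.length_take]; omega
    have hsne : s ≠ [] := by
      intro h; rw [h] at hslen; simp at hslen; omega
    obtain ⟨M, hM⟩ : ∃ M, PySem.List.max? s (fun x => x) = some M := by
      cases h : PySem.List.max? s (fun x => x) with
      | none => exact absurd ((PySem.List.max?_eq_none_iff _ _).mp h) hsne
      | some M => exact ⟨M, rfl⟩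
    obtain ⟨m0, hm0⟩ : ∃ m0, PySem.List.min? s (fun x => x) = some m0 := by
      cases h : PySem.List.min? s (fun x => x) with
      | none => exact absurd ((PySem.List.min?_eq_none_iff _ _).mp h) hsne
      | some m0 => exact ⟨m0, rfl⟩
    rw [hM, hm0]
    simp only [Option.getD_some]
    have hMmem : M ∈ s := PySem.List.max?_mem hM
    have hmmem : m0 ∈ s := PySem.List.min?_mem hm0
    have hMmax : ∀ y ∈ s, y ≤ M := PySem.List.max?_isMax hM
    have hmmin : ∀ y ∈ s, m0 ≤ y := PySem.List.min?_isMin hm0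
    -- value at any index t < N.toNat belongs to s and equals arr.getD t 0
    have hvs : ∀ t : Nat, t < N.toNat → arr.getD t 0 ∈ s := by
      intro t ht
      have ht' : t < s.length := by omega
      have h1 : t < arr.length := by omega
      have he : s[t]'ht' = arr.getD t 0 := by
        rw [List.getD_eq_getElem arr 0 h1]
        simp only [hsval, List.getElem_take]
      exact he ▸ List.getElem_mem ht'
    have hmM : m0 ≤ M := hmmin M hMmem
    refine le_antisymm ?_ ?_
    case _ =>
      -- upper bound: every triple term is at most 2*(M - m0)
      refine pvMaxfun_le arr N _ (by omega) (fun i j k hi hij hjk hk => ?_)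
      obtain ⟨ni, rfl⟩ : ∃ n : Nat, i = (n : Int) := ⟨i.toNat, by omega⟩
      obtain ⟨nj, rfl⟩ : ∃ n : Nat, j = (n : Int) := ⟨j.toNat, by omega⟩
      obtain ⟨nk, rfl⟩ : ∃ n : Nat, k = (n : Int) := ⟨k.toNat, by omega⟩
      unfold pvTerm
      simp only [PySem.List.pyGetD_natCast]
      have h1 := hvs ni (by omega)
      have h2 := hvs nj (by omega)
      have h3 := hvs nk (by omega)
      exact pvTri_le _ _ _ m0 M ⟨hmmin _ h1, hMmax _ h1, hmmin _ h2, hMmax _ h2,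
        hmmin _ h3, hMmax _ h3⟩
    case _ =>
      -- lower bound: a triple containing an argmax and an argmin reaches 2*(M - m0)
      by_cases hEq : M = m0
      · have := pvMaxfun_nonneg arr N; omega
      · obtain ⟨ip, hip, hips⟩ := List.getElem_of_mem hMmem
        obtain ⟨iq, hiq, hiqs⟩ := List.getElem_of_mem hmmem
        have hipN : ip < N.toNat := by omega
        have hiqN : iq < N.toNat := by omega
        have hipl : ip < arr.length := by omega
        have hiql : iq < arr.length := by omega
        have hipq : ip ≠ iq := by
          intro h; subst h; exact hEq (by rw [← hips, ← hiqs])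
        have hgp : arr.getD ip 0 = M := by
          rw [List.getD_eq_getElem arr 0 hipl, ← hips]
          simp only [hsval, List.getElem_take]
        have hgq : arr.getD iq 0 = m0 := by
          rw [List.getD_eq_getElem arr 0 hiql, ← hiqs]
          simp only [hsval, List.getElem_take]
        obtain ⟨r, hrN, hrp, hrq⟩ : ∃ r, r < N.toNat ∧ r ≠ ip ∧ r ≠ iq := by
          by_cases h0 : ip = 0 ∨ iq = 0
          · by_cases h1 : ip = 1 ∨ iq = 1
            · exact ⟨2, by omega, by omega, by omega⟩
            · exact ⟨1, by omega, by omega, by omega⟩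
          · exact ⟨0, by omega, by omega, by omega⟩
        have hbnds : ∀ t : Nat, t < N.toNat → m0 ≤ arr.getD t 0 ∧ arr.getD t 0 ≤ M :=
          fun t ht => ⟨hmmin _ (hvs t ht), hMmax _ (hvs t ht)⟩
        have hbp := hbnds ip hipN
        have hbq := hbnds iq hiqN
        have hbr := hbnds r hrN
        rcases Nat.lt_trichotomy ip iq with h1 | h1 | h1
        · rcases Nat.lt_trichotomy r ip with h2 | h2 | h2
          · exact pvPair_le arr N r ip iq h2 h1 (by omega) m0 M (Or.inr (Or.inr (Or.inr (Or.inl ⟨hgp, hgq⟩)))) ⟨hbr.1, hbr.2, hbp.1, hbp.2, hbq.1, hbq.2⟩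
          · omega
          · rcases Nat.lt_trichotomy r iq with h3 | h3 | h3
            · exact pvPair_le arr N ip r iq h2 h3 (by omega) m0 M (Or.inr (Or.inl ⟨hgp, hgq⟩)) ⟨hbp.1, hbp.2, hbr.1, hbr.2, hbq.1, hbq.2⟩
            · omega
            · exact pvPair_le arr N ip iq r h1 h3 (by omega) m0 M (Or.inl ⟨hgp, hgq⟩) ⟨hbp.1, hbp.2, hbq.1, hbq.2, hbr.1, hbr.2⟩
        · omega
        · rcases Nat.lt_trichotomy r iq with h2 | h2 | h2
          · exact pvPair_le arr N r iq ip h2 h1 (by omega) m0 M (Or.inr (Or.inr (Or.inr (Or.inr (Or.inr ⟨hgp, hgq⟩))))) ⟨hbr.1, hbr.2, hbq.1, hbq.2, hbp.1, hbp.2⟩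
          · omega
          · rcases Nat.lt_trichotomy r ip with h3 | h3 | h3
            · exact pvPair_le arr N iq r ip h2 h3 (by omega) m0 M (Or.inr (Or.inr (Or.inr (Or.inr (Or.inl ⟨hgp, hgq⟩))))) ⟨hbq.1, hbq.2, hbr.1, hbr.2, hbp.1, hbp.2⟩
            · omega
            · exact pvPair_le arr N iq ip r h1 h3 (by omega) m0 M (Or.inr (Or.inr (Or.inl ⟨hgp, hgq⟩))) ⟨hbq.1, hbq.2, hbp.1, hbp.2, hbr.1, hbr.2⟩
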